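-- pv_equiv track=rewrite | github.com/ethany21/BOJ-algorithm-python | Backtracking/BOJ2661.py | check
-- ===== SOURCE A (Python) =====
-- def check(temp):
--
--     result = False
--
--     for i in range(1,int(len(temp)/2) + 1):
--         front = temp[-i*2:-i]
--         back = temp[-i:]
--         if front == back:
--             result = True
--             break
--
--     return result
-- ===== SOURCE B (Python) =====
-- def check(temp):
--     # Reverse so a repeated adjacent block at the END becomes one at the START,
--     # then build a table z[k] = length of common prefix of s and s[k:], and scan it.
--     s = temp[::-1]
--     n = len(s)
--     z = [0] * n
--     for k in range(1, n):
--         j = 0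
--         while k + j < n and s[j] == s[k + j]:
--             j += 1
--         z[k] = j
--     for i in range(1, n // 2 + 1):
--         if z[i] >= i:
--             return True
--     return False
-- ===== Notes on version B (the rewrite author's own statement) =====
-- stated objective: alternative
-- what changed: Instead of repeatedly slicing the suffix halves and comparing them, B reverses the string, builds a Z-style table z[k] = length of the common prefix of s and s[k:], and scans it for some i with z[i] >= i.
import Mathlib
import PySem

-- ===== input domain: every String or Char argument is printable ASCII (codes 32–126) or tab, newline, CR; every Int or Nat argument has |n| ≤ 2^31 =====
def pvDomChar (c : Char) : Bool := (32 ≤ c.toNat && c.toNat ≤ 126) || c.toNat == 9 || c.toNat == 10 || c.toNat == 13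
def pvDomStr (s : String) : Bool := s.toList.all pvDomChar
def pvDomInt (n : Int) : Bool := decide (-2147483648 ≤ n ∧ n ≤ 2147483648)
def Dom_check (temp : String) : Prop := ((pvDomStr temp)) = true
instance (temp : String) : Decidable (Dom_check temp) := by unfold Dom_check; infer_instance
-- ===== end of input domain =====

-- B replaces A's repeated suffix-slice comparisons by: reverse the string, build the
-- table of common-prefix lengths z[k] = lcp(s, s[k:]), and scan it for z[i] ≥ i
-- (objective: alternative algorithm; same asymptotic cost).

-- ===== PORT A =====
-- A's for-loop with `break`: returns at the first i whose two slices agree.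
def checkLoopA (t : List Char) : List Int → Bool
  | [] => false
  | i :: rest =>
    if PySem.List.slice t (some (-i * 2)) (some (-i)) = PySem.List.slice t (some (-i)) none
    then true
    else checkLoopA t rest

def check (temp : String) : Bool :=
  let t := temp.toList
  -- int(len(temp)/2) = len // 2 since the length is nonnegative
  checkLoopA t (PySem.List.pyRange 1 (PySem.Int.floordiv (t.length : Int) 2 + 1) 1)

-- ===== PORT B =====
-- the inner while loop of Source B: chars matched before the first mismatch / end of the shorter list
def pvLcp : List Char → List Char → Nat
  | a :: as, b :: bs => if a = b then pvLcp as bs + 1 else 0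
  | _, _ => 0

-- the fill loop for z: z[0] stays 0, z[k] = lcp(s, s[k:]) for k ≥ 1 (each entry written independently)
def pvZAt (s : List Char) (k : Int) : Int :=
  if k = 0 then 0 else (pvLcp s (s.drop k.toNat) : Int)

def check_alt (temp : String) : Bool :=
  let s := temp.toList.reverse
  let n : Int := (s.length : Int)
  let z := (PySem.List.pyRange 0 n 1).map (pvZAt s)
  -- 'for i in range(1, n//2+1): if z[i] >= i: return True' / 'return False'
  (PySem.List.pyRange 1 (PySem.Int.floordiv n 2 + 1) 1).any
    (fun i => decide (PySem.List.pyGetD z i 0 ≥ i))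

-- ===== PRECONDITION & SPEC =====
def Spec_check (temp : String) (out : Bool) : Prop := out = check_alt temp
instance (temp : String) (out : Bool) : Decidable (Spec_check temp out) := by unfold Spec_check; infer_instance

-- ===== CLAIM (what is proved, stated in full; the proofs are below) =====
def Claim_equal_check : Prop := ∀ (temp : String), Dom_check temp → Spec_check temp (check temp)

-- ===== LEMMAS AND PROOFS =====

-- A's break-loop over a list of candidates is `any` of its test
theorem checkLoopA_eq_any (t : List Char) (l : List Int) :
    checkLoopA t l
      = l.any (fun i => decide (PySem.List.slice t (some (-i * 2)) (some (-i))
                                = PySem.List.slice t (some (-i)) none)) := by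
  induction l with
  | nil => rfl
  | cons i rest ih =>
    simp only [checkLoopA, List.any_cons, ← ih]
    by_cases h : PySem.List.slice t (some (-i * 2)) (some (-i))
                  = PySem.List.slice t (some (-i)) none <;> simp_all

-- i ≤ lcp a b iff the first i characters of a and b exist and agree
theorem le_pvLcp_iff (i : Nat) (a b : List Char) :
    i ≤ pvLcp a b ↔ i ≤ a.length ∧ i ≤ b.length ∧ a.take i = b.take i := by
  induction i generalizing a b with
  | zero => simp
  | succ i ih =>
    cases a with
    | nil => simp [pvLcp]
    | cons x as =>
      cases b with
      | nil => simp [pvLcp]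
      | cons y bs =>
        by_cases hxy : x = y
        · subst hxy
          simp [pvLcp, ih as bs]
        · simp [pvLcp, hxy]

-- the heart: for 1 ≤ i with 2i ≤ |t|, A's slice comparison at i equals B's table test at i
theorem slice_eq_iff_lcp (t : List Char) (i : Nat) (h1 : 1 ≤ i) (h2 : 2 * i ≤ t.length) :
    (PySem.List.slice t (some (-(i : Int) * 2)) (some (-(i : Int)))
      = PySem.List.slice t (some (-(i : Int))) none)
      ↔ i ≤ pvLcp t.reverse (t.reverse.drop i) := by
  have hn := t.length
  rw [le_pvLcp_iff]
  have hlen : (t.reverse.drop i).length = t.length - i := by simp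
  have h1' : i ≤ t.reverse.length := by simp; omega
  have h2' : i ≤ (t.reverse.drop i).length := by rw [hlen]; omega
  -- compute the two slices
  have hneg : -(i : Int) * 2 = -((2 * i : Nat) : Int) := by push_cast; ring
  have hslice1 : PySem.List.slice t (some (-(i : Int) * 2)) (some (-(i : Int)))
      = (t.drop (t.length - 2 * i)).take i := by
    simp only [PySem.List.slice, hneg]
    have c1 : PySem.List.clampIdx t.length (-((2 * i : Nat) : Int)) = t.length - 2 * i :=
      PySem.List.clampIdx_neg_natCast _ _ (by omega)
    have c2 : PySem.List.clampIdx t.length (-(i : Int)) = t.length - i := by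
      have := PySem.List.clampIdx_neg_natCast t.length i (by omega)
      simpa using this
    rw [c1, c2]
    congr 1
    omega
  have hslice2 : PySem.List.slice t (some (-(i : Int))) none = t.drop (t.length - i) := by
    have := PySem.List.slice_from_neg_natCast t i (by omega)
    simpa using this
  rw [hslice1, hslice2]
  -- move to the reversed string
  have htake : t.reverse.take i = (t.drop (t.length - i)).reverse := List.take_reverse
  have hdroptake : (t.reverse.drop i).take i = ((t.drop (t.length - 2 * i)).take i).reverse := by
    rw [List.drop_reverse, List.take_reverse, ← List.reverse_inj, List.reverse_reverse,
        List.reverse_reverse, List.length_take, List.drop_take]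
    have hmin : min (t.length - i) t.length = t.length - i := by omega
    rw [hmin]
    congr 2 <;> omega
  rw [htake, hdroptake, hlen, List.reverse_inj]
  constructor
  · intro h
    exact ⟨h1', by omega, by rw [h]⟩
  · intro ⟨_, _, h⟩
    exact h.symm

-- ===== VERDICT (by name: the statement is the Claim_ definition above) =====
theorem check_spec : Claim_equal_check := by
  intro temp _
  unfold Spec_check check check_alt
  simp only [List.length_reverse]
  rw [checkLoopA_eq_any]
  apply PySem.List.any_congr_mem
  intro i hi
  rw [PySem.List.mem_pyRange_one] at hi
  obtain ⟨h1, h2⟩ := hi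
  have hfd : PySem.Int.floordiv ((temp.toList.length : Nat) : Int) 2
      = ((temp.toList.length / 2 : Nat) : Int) := by
    exact_mod_cast PySem.Int.floordiv_natCast temp.toList.length 2
  rw [hfd] at h2
  have hle : i.toNat ≤ temp.toList.length / 2 := by omega
  have hin : 1 ≤ i.toNat := by omega
  have h2i : 2 * i.toNat ≤ temp.toList.length := by omega
  have hilt : i < ((temp.toList.length : Nat) : Int) := by omega
  rw [PySem.List.pyGetD_map_pyRange_of_nonneg (pvZAt temp.toList.reverse) _ i 0
        (by omega) hilt]
  unfold pvZAt
  rw [if_neg (by omega)]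
  have key := slice_eq_iff_lcp temp.toList i.toNat hin h2i
  have hicast : ((i.toNat : Nat) : Int) = i := by omega
  rw [hicast] at key
  rw [decide_eq_decide, key, ge_iff_le]
  generalize pvLcp temp.toList.reverse (temp.toList.reverse.drop i.toNat) = l
  omega
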